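-- pv_equiv track=rewrite | github.com/SamR5/Solveur-de-Scrabble | data_extract.py | data_last
-- ===== SOURCE A (Python) =====
-- import string
--
-- def data_last(data):
--     """{"a":wordsEndingWithA, "b":wordsEndingWithB, "c":...}"""
--     dic = {i:{j for j in data if j.endswith(i)}
--                 for i in string.ascii_lowercase}
--     toDel = []
--     for k, v in dic.items():
--         if len(v) == 0:
--             toDel.append(k)
--     for i in toDel:
--         del dic[i]
--     return dic
-- ===== SOURCE B (Python) =====
-- import string
--
-- def data_last(data):
--     """{"a":wordsEndingWithA, "b":wordsEndingWithB, "c":...}"""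
--     groups = {}
--     for w in data:
--         if w and w[-1] in string.ascii_lowercase:
--             groups.setdefault(w[-1], set()).add(w)
--     return {c: groups[c] for c in sorted(groups)}
-- ===== Notes on version B (the rewrite author's own statement) =====
-- stated objective: faster
-- what changed: A scans the whole word list once per lowercase letter (26 endswith passes over a dict it then prunes); B makes a single pass grouping each qualifying word into a dict keyed by its last letter and emits the groups with sorted keys, so no empty groups ever exist.
import Mathlib
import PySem

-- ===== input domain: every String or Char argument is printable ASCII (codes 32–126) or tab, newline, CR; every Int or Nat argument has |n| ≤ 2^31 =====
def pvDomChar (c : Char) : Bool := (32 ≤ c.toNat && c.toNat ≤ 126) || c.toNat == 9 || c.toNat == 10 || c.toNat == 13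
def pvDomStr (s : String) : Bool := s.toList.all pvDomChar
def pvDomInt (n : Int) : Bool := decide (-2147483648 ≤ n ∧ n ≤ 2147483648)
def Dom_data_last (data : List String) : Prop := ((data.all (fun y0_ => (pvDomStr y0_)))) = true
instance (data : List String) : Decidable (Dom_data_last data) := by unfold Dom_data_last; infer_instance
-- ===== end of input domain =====

-- B replaces A's 26 endswith-scans over the data with one grouping pass into a dict keyed by last letter
-- followed by a sorted-keys emission (objective: faster, constant-factor: one traversal instead of 26).


-- the 26 characters of string.ascii_lowercase
def lowerChars : List Char :=
  ['a','b','c','d','e','f','g','h','i','j','k','l','m','n','o','p','q','r','s','t','u','v','w','x','y','z']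

-- iterating the Python string string.ascii_lowercase yields its 1-char strings, in order;
-- letters26 is (by rfl) the literal list ["a","b",…,"z"]
def letters26 : List String := lowerChars.map (fun ch => String.ofList [ch])

-- ===== PORT A =====
def data_last (data : List String) : List (String × List String) :=
  -- dic = {i: {j for j in data if j.endswith(i)} for i in string.ascii_lowercase}
  let dic : PySem.Dict String (List String) :=
    letters26.foldl
      (fun d i => d.insert i (PySem.Set.ofList (data.filter (fun j => PySem.Str.endswith j i))))
      PySem.Dict.empty
  -- toDel = [k for k, v in dic.items() if len(v) == 0]
  let toDel : List String :=
    dic.items.foldl (fun acc kv => if PySem.Set.len kv.2 = 0 then acc ++ [kv.1] else acc) []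
  -- for i in toDel: del dic[i]
  (toDel.foldl (fun d k => d.erase k) dic).items

-- ===== PORT B =====
-- w[-1] rendered as a 1-char string (Python w[-1] is a str; only consulted for nonempty w)
def lastKey (w : String) : String :=
  match PySem.Str.pyGet? w (-1) with
  | some c => String.ofList [c]
  | none => ""

def data_last_alt (data : List String) : List (String × List String) :=
  -- groups = {}; for w in data: if w and w[-1] in string.ascii_lowercase: groups.setdefault(w[-1], set()).add(w)
  -- (membership of the 1-char string w[-1] in the string ascii_lowercase = membership in its list of letters)
  let groups : PySem.Dict String (List String) :=
    data.foldl
      (fun g w =>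
        if w ≠ "" ∧ lastKey w ∈ letters26 then
          g.modify (lastKey w) PySem.Set.empty (fun s => PySem.Set.add s w)
        else g)
      PySem.Dict.empty
  -- return {c: groups[c] for c in sorted(groups)}
  (PySem.List.sorted groups.keys (fun x => x) false).map (fun c => (c, groups.getD c []))

-- ===== PRECONDITION & SPEC =====
def Spec_data_last (data : List String) (out : List (String × List String)) : Prop := out = data_last_alt data
instance (data : List String) (out : List (String × List String)) : Decidable (Spec_data_last data out) := by unfold Spec_data_last; infer_instance

-- ===== CLAIM (what is proved, stated in full; the proofs are below) =====
def Claim_equal_data_last : Prop := ∀ (data : List String), Dom_data_last data → Spec_data_last data (data_last data)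

-- ===== LEMMAS AND PROOFS =====

-- the words of data ending in the letter c, as a Python set
def endSet (data : List String) (c : String) : List String :=
  PySem.Set.ofList (data.filter (fun j => PySem.Str.endswith j c))

-- B's grouping condition
def pB (w : String) : Bool := decide (w ≠ "" ∧ lastKey w ∈ letters26)

-- the common normal form both ports are reduced to
def normalForm (data : List String) : List (String × List String) :=
  (letters26.filter (fun c => decide (data.filter (fun j => PySem.Str.endswith j c) ≠ []))).map
    (fun c => (c, endSet data c))

lemma erase_items (d : PySem.Dict String (List String)) (k : String) :
    (d.erase k).items = d.items.filter (fun kv => !(kv.1 == k)) := by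
  simp [PySem.Dict.erase]

lemma foldl_erase_items (ks : List String) (d : PySem.Dict String (List String)) :
    (ks.foldl (fun d k => d.erase k) d).items = d.items.filter (fun kv => !(ks.contains kv.1)) := by
  induction ks generalizing d with
  | nil => simp
  | cons k ks ih =>
    simp only [List.foldl_cons, ih, erase_items, List.filter_filter]
    apply List.filter_congr
    intro kv _
    by_cases h : kv.1 = k <;> simp [h]
lemma suffix_singleton_iff (c : Char) (l : List Char) : [c] <:+ l ↔ l.getLast? = some c := by
  constructor
  · rintro ⟨t, rfl⟩; simp
  · intro h2
    have hne : l ≠ [] := by rintro rfl; simp at h2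
    exact ⟨l.dropLast, by simpa using (List.dropLast_append_getLast? c h2)⟩

lemma endswith_single (ch : Char) (w : String) :
    PySem.Str.endswith w (String.ofList [ch]) = true ↔ w.toList.getLast? = some ch := by
  rw [PySem.Str.endswith_eq, PySem.Chars.endswith_iff]
  · rw [show (String.ofList [ch]).toList = [ch] from (String.ofList_eq.mp rfl).symm]
    exact suffix_singleton_iff ch w.toList
lemma lastKey_eq (w : String) (ch : Char) (hw : w.toList.getLast? = some ch) :
    lastKey w = String.ofList [ch] := by
  simp [lastKey, PySem.Str.pyGet?_eq, PySem.List.pyGet?_neg_one, hw]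

-- pointwise: for a letter c, B's pred && key-match equals A's endswith test
lemma pred_eq (c : String) (hc : c ∈ letters26) (w : String) :
    (pB w && (lastKey w == c)) = PySem.Str.endswith w c := by
  obtain ⟨ch, hch, rfl⟩ := List.mem_map.mp hc
  by_cases h : w.toList.getLast? = some ch
  · have hw : w ≠ "" := by intro he; rw [he] at h; simp at h
    have hk := lastKey_eq w ch h
    rw [(endswith_single ch w).mpr h]
    simp only [pB, hk, beq_self_eq_true, Bool.and_true, decide_eq_true_eq]
    refine ⟨hw, ?_⟩
    exact List.mem_map.mpr ⟨ch, hch, rfl⟩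
  · have hR : PySem.Str.endswith w (String.ofList [ch]) = false := by
      rw [Bool.eq_false_iff]; intro hT; exact h ((endswith_single ch w).mp hT)
    rw [hR]
    rcases hlast : w.toList.getLast? with _ | ch'
    · have hw : w = "" := by
        have h0 : w.toList = [] := by simpa using hlast
        rw [← String.ofList_toList (s := w), h0]
      subst hw
      simp [pB]
    · have hk := lastKey_eq w ch' hlast
      have hne : (lastKey w == String.ofList [ch]) = false := by
        rw [hk, beq_eq_false_iff_ne]
        intro hcontra
        have hcc : ch' = ch := by simpa using String.ofList_inj.mp hcontra
        rw [hcc] at hlast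
        exact h hlast
      simp [hne]
lemma endSet_eq_nil_iff (data : List String) (c : String) :
    endSet data c = [] ↔ data.filter (fun j => PySem.Str.endswith j c) = [] := by
  unfold endSet
  constructor
  · intro h
    rw [List.eq_nil_iff_forall_not_mem] at h ⊢
    intro a ha
    exact h a ((PySem.Set.mem_ofList _ _).mpr ha)
  · intro h; rw [h]; rfl

lemma A_normal (data : List String) : data_last data = normalForm data := by
  unfold data_last
  have h1 : (letters26.foldl
      (fun d i => d.insert i (PySem.Set.ofList (data.filter (fun j => PySem.Str.endswith j i))))
      PySem.Dict.empty).items = letters26.map (fun c => (c, endSet data c)) := by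
    have := PySem.Dict.items_foldl_insert_fresh letters26 (fun i => i)
      (fun i => endSet data i) PySem.Dict.empty
      (fun a _ => PySem.Dict.contains_empty a)
      (by decide)
    simpa [endSet] using this
  simp only [h1, PySem.List.foldl_append_ite, foldl_erase_items, List.nil_append]
  have htd : (List.map Prod.fst
      (List.filter (fun x => decide (PySem.Set.len x.2 = 0))
        (List.map (fun c => (c, endSet data c)) letters26)))
      = letters26.filter (fun c => decide (PySem.Set.len (endSet data c) = 0)) := by
    simp only [List.filter_map, List.map_map, Function.comp_def, List.map_id']
  rw [htd, List.filter_map]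
  unfold normalForm
  refine congrArg (List.map (fun c => (c, endSet data c))) ?_
  apply List.filter_congr
  intro c hc
  have hnd : letters26.Nodup := by decide
  have hlen : ∀ b : String, PySem.Set.len (endSet data b) = 0 ↔ endSet data b = [] := by
    intro b; simp [PySem.Set.len]
  simp only [Function.comp, List.contains_eq_mem, List.mem_filter, Bool.not_eq_eq_eq_not,
    decide_eq_true_eq, hlen,
    endSet_eq_nil_iff, hc, true_and]
  rw [← decide_not, decide_eq_decide]
  simp

lemma getD_groups (l : List String) (d : PySem.Dict String (List String)) (c : String) :
    ((l.foldl (fun g w => g.modify (lastKey w) PySem.Set.empty (fun s => PySem.Set.add s w)) d).getD c PySem.Set.empty)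
      = (l.filter (fun w => lastKey w == c)).foldl (fun s w => PySem.Set.add s w) (d.getD c PySem.Set.empty) := by
  induction l generalizing d with
  | nil => rfl
  | cons w l ih =>
    rw [List.foldl_cons, ih, PySem.Dict.getD_modify, List.filter_cons]
    by_cases h : c = lastKey w
    · subst h; simp
    · have hb : (lastKey w == c) = false := beq_eq_false_iff_ne.mpr (fun e => h e.symm)
      simp [h, hb]

lemma letters26_pairwise : letters26.Pairwise (· < ·) := by
  unfold letters26
  rw [List.pairwise_map]
  refine List.Pairwise.imp ?_ (by decide : lowerChars.Pairwise (· < ·))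
  intro a b hab
  rw [String.lt_iff_toList_lt]
  have ha : (String.ofList [a]).toList = [a] := (String.ofList_eq.mp rfl).symm
  have hb : (String.ofList [b]).toList = [b] := (String.ofList_eq.mp rfl).symm
  rw [ha, hb]
  exact List.Lex.rel hab

lemma B_normal (data : List String) : data_last_alt data = normalForm data := by
  simp only [data_last_alt]
  rw [PySem.List.foldl_ite_eq_foldl_filter]
  have hkeys : ((data.filter (fun w => decide (w ≠ "" ∧ lastKey w ∈ letters26))).foldl
      (fun g w => g.modify (lastKey w) PySem.Set.empty (fun s => PySem.Set.add s w))
      PySem.Dict.empty).keys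
      = PySem.Set.ofList ((data.filter (fun w => decide (w ≠ "" ∧ lastKey w ∈ letters26))).map lastKey) := by
    rw [PySem.Dict.keys_foldl_modify_key _ lastKey PySem.Set.empty (fun _ w s => PySem.Set.add s w)]
    rw [PySem.Dict.keys_empty, PySem.Set.update_nil_left]
  have hgetD : ∀ c, ((data.filter (fun w => decide (w ≠ "" ∧ lastKey w ∈ letters26))).foldl
      (fun g w => g.modify (lastKey w) PySem.Set.empty (fun s => PySem.Set.add s w))
      PySem.Dict.empty).getD c []
      = PySem.Set.ofList ((data.filter (fun w => decide (w ≠ "" ∧ lastKey w ∈ letters26))).filter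
          (fun w => lastKey w == c)) := by
    intro c
    show ((data.filter (fun w => decide (w ≠ "" ∧ lastKey w ∈ letters26))).foldl
      (fun g w => g.modify (lastKey w) PySem.Set.empty (fun s => PySem.Set.add s w))
      PySem.Dict.empty).getD c PySem.Set.empty = _
    rw [getD_groups]
    rfl
  have hmem : ∀ c, c ∈ PySem.Set.ofList ((data.filter (fun w => decide (w ≠ "" ∧ lastKey w ∈ letters26))).map lastKey)
      ↔ ∃ w ∈ data, (w ≠ "" ∧ lastKey w ∈ letters26) ∧ lastKey w = c := by
    intro c
    rw [PySem.Set.mem_ofList, List.mem_map]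
    constructor
    · rintro ⟨w, hw, rfl⟩
      rw [List.mem_filter] at hw
      exact ⟨w, hw.1, of_decide_eq_true hw.2, rfl⟩
    · rintro ⟨w, hw, hcond, rfl⟩
      exact ⟨w, List.mem_filter.mpr ⟨hw, decide_eq_true hcond⟩, rfl⟩
  have hsorted : PySem.List.sorted
      (PySem.Set.ofList ((data.filter (fun w => decide (w ≠ "" ∧ lastKey w ∈ letters26))).map lastKey))
      (fun x => x) false
      = letters26.filter
          (fun c => decide (c ∈ PySem.Set.ofList ((data.filter (fun w => decide (w ≠ "" ∧ lastKey w ∈ letters26))).map lastKey))) := by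
    apply PySem.List.sorted_eq_of_perm_of_pairwise_lt
    · apply (List.perm_ext_iff_of_nodup ((by decide : letters26.Nodup).filter _) (PySem.Set.nodup_ofList _)).mpr
      intro c
      rw [List.mem_filter, decide_eq_true_eq]
      constructor
      · exact fun h => h.2
      · intro h
        refine ⟨?_, h⟩
        obtain ⟨w, _, hcond, rfl⟩ := (hmem c).mp h
        exact hcond.2
    · exact List.Pairwise.filter _ letters26_pairwise
  rw [hkeys, hsorted]
  unfold normalForm
  have hfc : ∀ c ∈ letters26,
      decide (c ∈ PySem.Set.ofList ((data.filter (fun w => decide (w ≠ "" ∧ lastKey w ∈ letters26))).map lastKey))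
      = decide (data.filter (fun j => PySem.Str.endswith j c) ≠ []) := by
    intro c hc
    rw [decide_eq_decide, hmem c]
    constructor
    · rintro ⟨w, hw, hcond, rfl⟩
      intro hnil
      rw [List.filter_eq_nil_iff] at hnil
      refine hnil w hw ?_
      rw [← pred_eq (lastKey w) hc w]
      simp [pB, hcond]
    · intro hne
      have hex : ∃ w ∈ data, PySem.Str.endswith w c = true := by
        by_contra hno
        push Not at hno
        refine hne (List.filter_eq_nil_iff.mpr ?_)
        intro w hw
        simpa using hno w hw
      obtain ⟨w, hw, hew⟩ := hex
      rw [← pred_eq c hc w, Bool.and_eq_true] at hew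
      obtain ⟨hpb, hbeq⟩ := hew
      have hcond := of_decide_eq_true (p := w ≠ "" ∧ lastKey w ∈ letters26) hpb
      exact ⟨w, hw, hcond, eq_of_beq hbeq⟩
  rw [List.filter_congr hfc]
  apply List.map_congr_left
  intro c hcf
  have hc : c ∈ letters26 := (List.mem_filter.mp hcf).1
  rw [hgetD c]
  unfold endSet
  congr 1
  rw [List.filter_filter]
  congr 1
  apply List.filter_congr
  intro w _
  rw [← pred_eq c hc w]
  exact Bool.and_comm _ _

-- ===== VERDICT (by name: the statement is the Claim_ definition above) =====
theorem data_last_spec : Claim_equal_data_last := by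
  intro data _
  unfold Spec_data_last
  rw [A_normal, B_normal]
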